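-- pv_equiv track=rewrite | github.com/thanhtungit92/taphoaweb-vn | scripts/send_traffic_report.py | page_breakdown_lines
-- ===== SOURCE A (Python) =====
-- def page_breakdown_lines(rows: list[dict[str, object]]) -> list[str]:
--     if not rows:
--         return ["- Không có dữ liệu: 0 pageview / 0 visitor"]
--
--     grouped: dict[str, list[dict[str, object]]] = {}
--     for row in rows:
--         path = str(row.get("path", "/"))
--         grouped.setdefault(path, []).append(row)
--
--     sorted_items = sorted(
--         grouped.items(),
--         key=lambda item: (-len(item[1]), item[0])
--     )
--
--     lines: list[str] = []
--     for path, path_rows in sorted_items: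
--         visitors = len({str(row.get("visitorId", "")) for row in path_rows if row.get("visitorId")})
--         lines.append(f"- {path}: {len(path_rows)} pageview / {visitors} visitor")
--
--     return lines
-- ===== SOURCE B (Python) =====
-- def page_breakdown_lines(rows: list[dict[str, object]]) -> list[str]:
--     if not rows:
--         return ["- Không có dữ liệu: 0 pageview / 0 visitor"]
--
--     counts: dict[str, int] = {}
--     visitors: dict[str, set] = {}
--     for row in rows:
--         path = str(row.get("path", "/"))
--         counts[path] = counts.get(path, 0) + 1
--         vid = row.get("visitorId")
--         if vid:
--             visitors.setdefault(path, set()).add(str(vid))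
--
--     return [
--         f"- {path}: {counts[path]} pageview / {len(visitors.get(path, set()))} visitor"
--         for path in sorted(counts, key=lambda p: (-counts[p], p))
--     ]
-- ===== Notes on version B (the rewrite author's own statement) =====
-- stated objective: alternative
-- what changed: B aggregates in a single pass over rows, maintaining a pageview counter and a visitor-ID set per path, instead of A's grouping of full row lists followed by a per-group rescan (set comprehension) at formatting time; lines are then formatted directly from the stored count and set size.
import Mathlib
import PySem

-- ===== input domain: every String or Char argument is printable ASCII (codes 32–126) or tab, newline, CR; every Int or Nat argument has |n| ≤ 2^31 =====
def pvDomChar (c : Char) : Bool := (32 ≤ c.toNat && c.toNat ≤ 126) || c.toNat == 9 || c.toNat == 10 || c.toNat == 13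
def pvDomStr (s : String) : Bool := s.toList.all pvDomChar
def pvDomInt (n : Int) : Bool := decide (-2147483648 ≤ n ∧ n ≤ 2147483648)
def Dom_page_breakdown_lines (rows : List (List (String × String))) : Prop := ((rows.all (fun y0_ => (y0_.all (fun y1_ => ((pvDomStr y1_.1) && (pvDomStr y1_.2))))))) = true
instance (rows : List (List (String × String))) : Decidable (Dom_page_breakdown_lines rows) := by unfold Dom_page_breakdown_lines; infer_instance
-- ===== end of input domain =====

-- B replaces A's group-then-rescan (retained per-path row lists + a per-group set comprehension at
-- formatting time) by a single-pass aggregation of a pageview counter and a visitor-ID set per path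
-- (alternative decomposition, same asymptotic cost).


-- ===== PORT A =====
-- row.get(k, d) on a Python dict given as a pair list: build the dict (later duplicates overwrite), then look up.
def pvRowGetD (row : List (String × String)) (k d : String) : String :=
  (PySem.Dict.ofList row).getD k d

-- f"- {path}: {pv} pageview / {vis} visitor"
def pvLine (path : String) (pv vis : Int) : String :=
  "- " ++ path ++ ": " ++ PySem.Int.toStr pv ++ " pageview / " ++ PySem.Int.toStr vis ++ " visitor"

def page_breakdown_lines (rows : List (List (String × String))) : List String :=
  if rows = [] then ["- Không có dữ liệu: 0 pageview / 0 visitor"] else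
  let grouped : PySem.Dict String (List (List (String × String))) :=
    rows.foldl (fun g row => g.modify (pvRowGetD row "path" "/") [] (fun l => l ++ [row])) PySem.Dict.empty
  let sortedItems := PySem.List.sorted2 grouped.items (fun it => -(it.2.length : Int)) (fun it => it.1)
  sortedItems.foldl (fun lines it =>
    let visitors := (PySem.Set.ofList ((it.2.filter (fun row => pvRowGetD row "visitorId" "" != "")).map
        (fun row => pvRowGetD row "visitorId" ""))).length
    lines ++ [pvLine it.1 (it.2.length : Int) (visitors : Int)]) []

-- ===== PORT B =====
def page_breakdown_lines_alt (rows : List (List (String × String))) : List String :=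
  if rows = [] then ["- Không có dữ liệu: 0 pageview / 0 visitor"] else
  let st := rows.foldl
    (fun (st : PySem.Dict String Int × PySem.Dict String (PySem.Set String)) row =>
      let path := pvRowGetD row "path" "/"
      let counts := st.1.modify path 0 (fun n => n + 1)
      let vid := pvRowGetD row "visitorId" ""
      let vis := if vid ≠ "" then st.2.modify path [] (fun s => PySem.Set.add s vid) else st.2
      (counts, vis))
    (PySem.Dict.empty, PySem.Dict.empty)
  (PySem.List.sorted2 st.1.keys (fun p => -(st.1.getD p 0)) (fun p => p)).map
    (fun p => pvLine p (st.1.getD p 0) ((st.2.getD p []).length : Int))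

-- ===== PRECONDITION & SPEC =====
def Spec_page_breakdown_lines (rows : List (List (String × String))) (out : List String) : Prop := out = page_breakdown_lines_alt rows
instance (rows : List (List (String × String))) (out : List String) : Decidable (Spec_page_breakdown_lines rows out) := by unfold Spec_page_breakdown_lines; infer_instance

-- ===== CLAIM (what is proved, stated in full; the proofs are below) =====
def Claim_equal_page_breakdown_lines : Prop := ∀ (rows : List (List (String × String))), Dom_page_breakdown_lines rows → Spec_page_breakdown_lines rows (page_breakdown_lines rows)

-- ===== LEMMAS AND PROOFS =====

-- proof-side abbreviations
def pvVid (row : List (String × String)) : String := pvRowGetD row "visitorId" ""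
def pvVisSet (l : List (List (String × String))) : PySem.Set String :=
  PySem.Set.ofList ((l.filter (fun row => pvVid row != "")).map pvVid)

-- the joint loop invariant between A's grouping fold and B's aggregation fold
def pvInv (g : PySem.Dict String (List (List (String × String))))
    (c : PySem.Dict String Int) (v : PySem.Dict String (PySem.Set String)) : Prop :=
  c.keys = g.keys ∧ g.keys.Nodup ∧
  (∀ p, c.getD p 0 = ((g.getD p []).length : Int)) ∧
  (∀ p, v.getD p [] = pvVisSet (g.getD p []))

theorem pvInv_empty : pvInv PySem.Dict.empty PySem.Dict.empty PySem.Dict.empty := by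
  refine ⟨rfl, by simp [PySem.Dict.keys_empty], ?_, ?_⟩ <;>
    intro p <;> simp [PySem.Dict.getD_empty, pvVisSet]

theorem pvInv_step (g : PySem.Dict String (List (List (String × String))))
    (c : PySem.Dict String Int) (v : PySem.Dict String (PySem.Set String))
    (row : List (String × String)) (h : pvInv g c v) :
    pvInv (g.modify (pvRowGetD row "path" "/") [] (fun l => l ++ [row]))
      (c.modify (pvRowGetD row "path" "/") 0 (fun n => n + 1))
      (if pvVid row ≠ "" then v.modify (pvRowGetD row "path" "/") [] (fun s => PySem.Set.add s (pvVid row)) else v) := by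
  obtain ⟨hk, hnd, hc, hv⟩ := h
  set path := pvRowGetD row "path" "/" with hpath
  have hcont : c.contains path = g.contains path := by
    rw [PySem.Dict.contains_eq_decide_mem_keys, PySem.Dict.contains_eq_decide_mem_keys, hk]
  refine ⟨?_, ?_, ?_, ?_⟩
  · rw [PySem.Dict.keys_modify, PySem.Dict.keys_modify]
    by_cases hct : g.contains path = true
    · rw [PySem.Dict.keys_insert_of_contains _ _ hct, PySem.Dict.keys_insert_of_contains _ _ (hcont ▸ hct), hk]
    · have hcf : g.contains path = false := by simpa using hct
      rw [PySem.Dict.keys_insert_of_not_contains _ _ hcf,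
          PySem.Dict.keys_insert_of_not_contains _ _ (by rw [hcont]; exact hcf), hk]
  · rw [PySem.Dict.keys_modify]
    by_cases hct : g.contains path = true
    · rw [PySem.Dict.keys_insert_of_contains _ _ hct]; exact hnd
    · have hcf : g.contains path = false := by simpa using hct
      rw [PySem.Dict.keys_insert_of_not_contains _ _ hcf]
      have : path ∉ g.keys := by
        rw [PySem.Dict.contains_eq_decide_mem_keys] at hcf; simpa using hcf
      refine List.Nodup.append hnd (by simp) ?_
      intro a ha hb
      exact this ((List.mem_singleton.mp hb) ▸ ha)
  · intro p
    rw [PySem.Dict.getD_modify, PySem.Dict.getD_modify]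
    by_cases hp : p = path
    · subst hp; rw [if_pos rfl, if_pos rfl, hc]; simp [List.length_append]
    · rw [if_neg hp, if_neg hp, hc]
  · intro p
    by_cases hvid : pvVid row ≠ ""
    · rw [if_pos hvid]
      rw [PySem.Dict.getD_modify, PySem.Dict.getD_modify]
      by_cases hp : p = path
      · subst hp; rw [if_pos rfl, if_pos rfl]
        rw [hv path, pvVisSet, pvVisSet, List.filter_append, List.map_append]
        have : List.filter (fun row => pvVid row != "") [row] = [row] := by
          have hb : (pvVid row != "") = true := by simpa using hvid
          simp [List.filter, hb]
        rw [this, List.map_cons, List.map_nil, PySem.Set.ofList_append_singleton]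
      · rw [if_neg hp, if_neg hp, hv p]
    · rw [if_neg hvid]
      rw [PySem.Dict.getD_modify]
      by_cases hp : p = path
      · subst hp; rw [if_pos rfl]
        rw [hv path, pvVisSet, pvVisSet, List.filter_append]
        have : List.filter (fun row => pvVid row != "") [row] = [] := by
          simp only [ne_eq, not_not] at hvid
          simp only [List.filter, hvid, bne_self_eq_false]
        simp [this]
      · rw [if_neg hp, hv p]

theorem pvInv_fold (rows : List (List (String × String)))
    (g : PySem.Dict String (List (List (String × String))))
    (c : PySem.Dict String Int) (v : PySem.Dict String (PySem.Set String)) (h : pvInv g c v) :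
    pvInv (rows.foldl (fun g row => g.modify (pvRowGetD row "path" "/") [] (fun l => l ++ [row])) g)
      (rows.foldl (fun (st : PySem.Dict String Int × PySem.Dict String (PySem.Set String)) row =>
        let path := pvRowGetD row "path" "/"
        let counts := st.1.modify path 0 (fun n => n + 1)
        let vid := pvRowGetD row "visitorId" ""
        let vis := if vid ≠ "" then st.2.modify path [] (fun s => PySem.Set.add s vid) else st.2
        (counts, vis)) (c, v)).1
      (rows.foldl (fun (st : PySem.Dict String Int × PySem.Dict String (PySem.Set String)) row =>
        let path := pvRowGetD row "path" "/"
        let counts := st.1.modify path 0 (fun n => n + 1)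
        let vid := pvRowGetD row "visitorId" ""
        let vis := if vid ≠ "" then st.2.modify path [] (fun s => PySem.Set.add s vid) else st.2
        (counts, vis)) (c, v)).2 := by
  induction rows generalizing g c v with
  | nil => exact h
  | cons row rows ih => exact ih _ _ _ (pvInv_step g c v row h)

-- mapping commutes with insertBy / the insertion-sort fold / sorted2
theorem pv_insertBy_map {α β : Type} (f : α → β) (before : β → β → Bool) (x : α) (l : List α) :
    PySem.List.insertBy before (f x) (l.map f) =
      (PySem.List.insertBy (fun a b => before (f a) (f b)) x l).map f := by
  induction l with
  | nil => rfl
  | cons y ys ih =>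
      simp only [List.map_cons, PySem.List.insertBy]
      by_cases hb : before (f x) (f y) = true <;> simp [hb, ih]

theorem pv_foldl_insertBy_map {α β : Type} (f : α → β) (before : β → β → Bool) :
    ∀ (l : List α) (acc : List α),
      (l.map f).foldl (fun a x => PySem.List.insertBy before x a) (acc.map f) =
        (l.foldl (fun a x => PySem.List.insertBy (fun u v => before (f u) (f v)) x a) acc).map f := by
  intro l
  induction l with
  | nil => intro acc; rfl
  | cons x xs ih =>
      intro acc
      simp only [List.map_cons, List.foldl_cons]
      rw [pv_insertBy_map, ih]

theorem pv_sorted2_map {α β k₁ k₂ : Type} [LT k₁] [DecidableLT k₁] [LT k₂] [DecidableLT k₂]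
    (f : α → β) (l : List α) (key1 : β → k₁) (key2 : β → k₂) :
    PySem.List.sorted2 (l.map f) key1 key2 false =
      (PySem.List.sorted2 l (fun a => key1 (f a)) (fun a => key2 (f a)) false).map f := by
  show (l.map f).foldl (fun a x => PySem.List.insertBy _ x a) ([].map f) = _
  rw [pv_foldl_insertBy_map]
  rfl

-- sorted2 only looks at the keys of members
theorem pv_insertBy_congr {α : Type} (P : α → Prop) (before before' : α → α → Bool)
    (hb : ∀ a b, P a → P b → before a b = before' a b) (x : α) (hx : P x) :
    ∀ (acc : List α), (∀ y ∈ acc, P y) → PySem.List.insertBy before x acc = PySem.List.insertBy before' x acc := by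
  intro acc
  induction acc with
  | nil => intro _; rfl
  | cons y ys ih =>
      intro hacc
      simp only [PySem.List.insertBy]
      rw [hb x y hx (hacc y (by simp))]
      by_cases h : before' x y = true
      · simp [h]
      · simp only [h]
        rw [ih (fun z hz => hacc z (by simp [hz]))]

theorem pv_foldl_insertBy_congr {α : Type} (P : α → Prop) (before before' : α → α → Bool)
    (hb : ∀ a b, P a → P b → before a b = before' a b) :
    ∀ (l : List α) (acc : List α), (∀ x ∈ l, P x) → (∀ x ∈ acc, P x) →
      l.foldl (fun a x => PySem.List.insertBy before x a) acc =
        l.foldl (fun a x => PySem.List.insertBy before' x a) acc := by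
  intro l
  induction l with
  | nil => intro acc _ _; rfl
  | cons x xs ih =>
      intro acc hl hacc
      simp only [List.foldl_cons]
      rw [pv_insertBy_congr P before before' hb x (hl x (by simp)) acc hacc]
      exact ih _ (fun z hz => hl z (by simp [hz]))
        (fun z hz => (PySem.List.mem_insertBy before' x z acc).mp hz |>.elim
          (fun h => h ▸ hl x (by simp)) (fun h => hacc z h))

theorem pv_sorted2_congr {α k₁ k₂ : Type} [LT k₁] [DecidableLT k₁] [LT k₂] [DecidableLT k₂]
    (l : List α) (key1 key1' : α → k₁) (key2 key2' : α → k₂)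
    (h : ∀ x ∈ l, key1 x = key1' x ∧ key2 x = key2' x) :
    PySem.List.sorted2 l key1 key2 false = PySem.List.sorted2 l key1' key2' false := by
  show l.foldl _ [] = l.foldl _ []
  exact pv_foldl_insertBy_congr (fun x => x ∈ l) _ _
    (fun a b ha hbb => by
      simp only [Bool.false_eq_true, if_false]
      rw [(h a ha).1, (h a ha).2, (h b hbb).1, (h b hbb).2]) l [] (fun x hx => hx) (by simp)

-- the post-loop computations agree whenever the invariant holds
theorem pv_tail_eq (g : PySem.Dict String (List (List (String × String))))
    (c : PySem.Dict String Int) (v : PySem.Dict String (PySem.Set String)) (h : pvInv g c v) :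
    ((PySem.List.sorted2 g.items (fun it => -(it.2.length : Int)) (fun it => it.1)).foldl
      (fun lines it => lines ++ [pvLine it.1 (it.2.length : Int)
        (((PySem.Set.ofList ((it.2.filter (fun row => pvRowGetD row "visitorId" "" != "")).map
            (fun row => pvRowGetD row "visitorId" ""))).length : Int))]) [])
    = (PySem.List.sorted2 c.keys (fun p => -(c.getD p 0)) (fun p => p)).map
        (fun p => pvLine p (c.getD p 0) ((v.getD p []).length : Int)) := by
  obtain ⟨hk, hnd, hc, hv⟩ := h
  have hmem : ∀ it ∈ g.items, c.getD it.1 0 = (it.2.length : Int) ∧ v.getD it.1 [] = pvVisSet it.2 := by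
    intro it hit
    obtain ⟨p, l⟩ := it
    have hgd : g.getD p [] = l := PySem.Dict.getD_of_mem_items g hit hnd []
    exact ⟨by rw [hc p, hgd], by rw [hv p, hgd]⟩
  rw [PySem.List.foldl_append_singleton_eq_map, List.nil_append]
  have hkeys : c.keys = g.items.map (fun it => it.1) := hk
  rw [hkeys]
  rw [pv_sorted2_map (fun it : String × List (List (String × String)) => it.1) g.items
    (fun p => -(c.getD p 0)) (fun p => p)]
  rw [pv_sorted2_congr g.items (fun it => -(c.getD it.1 0)) (fun it => -(it.2.length : Int))
    (fun it => it.1) (fun it => it.1) (fun it hit => ⟨by simp only [(hmem it hit).1], rfl⟩)]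
  rw [List.map_map]
  apply List.map_congr_left
  intro it hit
  have hit' : it ∈ g.items := (PySem.List.sorted2_perm _ _ _ _).mem_iff.mp hit
  obtain ⟨h1, h2⟩ := hmem it hit'
  simp only [Function.comp]
  rw [h1, h2]
  rfl

-- ===== VERDICT (by name: the statement is the Claim_ definition above) =====
theorem page_breakdown_lines_spec : Claim_equal_page_breakdown_lines := by
  intro rows _
  show page_breakdown_lines rows = page_breakdown_lines_alt rows
  by_cases hrows : rows = []
  · subst hrows; rfl
  · have inv := pvInv_fold rows PySem.Dict.empty PySem.Dict.empty PySem.Dict.empty pvInv_empty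
    unfold page_breakdown_lines page_breakdown_lines_alt
    rw [if_neg hrows, if_neg hrows]
    exact pv_tail_eq _ _ _ inv
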